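-- pv_equiv track=rewrite | github.com/KimTaegwan03/MMSF | preprocessing/whisper_transform.py | convert_to_llm_format
-- ===== SOURCE A (Python) =====
-- def convert_to_llm_format(assigned_words):
--     result = []
--     current_speaker = None
--     speaker_map = {}
--     speaker_counter = 1
--
--     for word_info in assigned_words:
--         spk_raw = word_info["speaker"]
--
--         # speaker 라벨 정규화 (<Speaker1>, <Speaker2>, ...)
--         if spk_raw not in speaker_map:
--             speaker_map[spk_raw] = f"<Speaker{speaker_counter}>"
--             speaker_counter += 1
--
--         spk_tag = speaker_map[spk_raw]
--
--         # 화자가 바뀌면 새 태그로 시작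
--         if spk_tag != current_speaker:
--             result.append(f"{spk_tag}:")
--             current_speaker = spk_tag
--
--         # 단어 추가
--         result.append(word_info["word"])
--
--     return " ".join(result)
-- ===== SOURCE B (Python) =====
-- def convert_to_llm_format(assigned_words):
--     parts = []
--     tags = {}
--     n = len(assigned_words)
--     i = 0
--     while i < n:
--         spk = assigned_words[i]["speaker"]
--         if spk not in tags:
--             tags[spk] = f"<Speaker{len(tags) + 1}>"
--         parts.append(tags[spk] + ":")
--         j = i
--         while j < n and assigned_words[j]["speaker"] == spk:
--             parts.append(assigned_words[j]["word"])
--             j += 1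
--         i = j
--     return " ".join(parts)
-- ===== Notes on version B (the rewrite author's own statement) =====
-- stated objective: alternative
-- what changed: A's single pass with a current_speaker state machine is replaced by an outer loop over maximal same-speaker runs (an inner index scan finds each run's end, the tag is emitted once per run and the counter is read off len(tags)), dropping the per-word current_speaker comparison.
import Mathlib
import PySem

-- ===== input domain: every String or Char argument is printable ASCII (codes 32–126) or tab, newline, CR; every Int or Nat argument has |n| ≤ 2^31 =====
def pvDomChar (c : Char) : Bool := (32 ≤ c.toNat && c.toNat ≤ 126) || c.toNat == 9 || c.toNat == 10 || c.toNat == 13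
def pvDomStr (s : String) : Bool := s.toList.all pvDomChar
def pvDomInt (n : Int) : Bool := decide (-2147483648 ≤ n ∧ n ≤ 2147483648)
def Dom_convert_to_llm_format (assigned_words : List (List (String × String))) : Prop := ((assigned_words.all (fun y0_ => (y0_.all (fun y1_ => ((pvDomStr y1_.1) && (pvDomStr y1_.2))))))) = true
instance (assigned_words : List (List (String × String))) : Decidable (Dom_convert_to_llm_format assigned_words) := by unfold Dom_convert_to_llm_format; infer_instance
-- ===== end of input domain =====

-- B replaces A's per-word current_speaker state machine by an outer loop over maximal
-- same-speaker runs (an inner scan finds the run end, the tag is emitted once per run and the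
-- counter is read off len(tags)); same cost, different decomposition ("alternative").

-- ===== PORT A =====
-- word_info["k"] (dict lookup, first match); total via default "" — inputs where the key is
-- missing (Python KeyError) are excluded by Pre_convert_to_llm_format below.
def dGetD (w : List (String × String)) (k : String) : String :=
  (PySem.Dict.mk w).getD k ""

-- f"<Speaker{n}>"
def tagOf (n : Int) : String := "<Speaker" ++ PySem.Int.toStr n ++ ">"

-- the body of A's for-loop; state = (result, current_speaker, speaker_map, speaker_counter)
def aStep (st : List String × Option String × PySem.Dict String String × Int)
    (w : List (String × String)) :
    List String × Option String × PySem.Dict String String × Int :=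
  let spk := dGetD w "speaker"
  let mc : PySem.Dict String String × Int :=
    if st.2.2.1.contains spk then (st.2.2.1, st.2.2.2)
    else (st.2.2.1.insert spk (tagOf st.2.2.2), st.2.2.2 + 1)
  let tag := mc.1.getD spk ""
  let rc : List String × Option String :=
    if st.2.1 ≠ some tag then (st.1 ++ [tag ++ ":"], some tag) else (st.1, st.2.1)
  (rc.1 ++ [dGetD w "word"], rc.2, mc.1, mc.2)

def convert_to_llm_format (assigned_words : List (List (String × String))) : String :=
  PySem.Str.join " " (assigned_words.foldl aStep ([], none, PySem.Dict.empty, 1)).1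

-- ===== PORT B =====
-- the inner while loop: from index j, collect the words of the run of speaker spk and
-- return them together with the index where the run ends (fuel = a structural totality
-- guard; fuel xs.length - j always suffices, the loop itself stops at xs.length)
def altInner (xs : List (List (String × String))) (spk : String) :
    Nat → Nat → List String × Nat
  | 0, j => ([], j)
  | fuel + 1, j =>
    if h : j < xs.length then
      if dGetD xs[j] "speaker" == spk then
        (dGetD xs[j] "word" :: (altInner xs spk fuel (j + 1)).1,
         (altInner xs spk fuel (j + 1)).2)
      else ([], j)
    else ([], j)

-- the outer while loop: index i, tags dict, emitting tag-then-run for each run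
-- (fuel = structural totality guard; xs.length suffices: every run advances i by ≥ 1)
def altOuter (xs : List (List (String × String))) :
    Nat → Nat → PySem.Dict String String → List String
  | 0, _, _ => []
  | fuel + 1, i, tags =>
    if h : i < xs.length then
      let spk := dGetD xs[i] "speaker"
      let tags' := if tags.contains spk then tags
                   else tags.insert spk (tagOf ((tags.size : Int) + 1))
      (tags'.getD spk "" ++ ":") ::
        ((altInner xs spk (xs.length - i) i).1 ++
          altOuter xs fuel (altInner xs spk (xs.length - i) i).2 tags')
    else []

def convert_to_llm_format_alt (assigned_words : List (List (String × String))) : String :=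
  PySem.Str.join " " (altOuter assigned_words assigned_words.length 0 PySem.Dict.empty)

-- ===== PRECONDITION & SPEC =====
-- Pre_ excludes exactly the inputs where some word dict lacks the "speaker" or "word" key,
-- on which Python A raises KeyError.
def Pre_convert_to_llm_format (assigned_words : List (List (String × String))) : Prop :=
  ∀ w ∈ assigned_words, (PySem.Dict.mk w).contains "speaker" = true ∧
    (PySem.Dict.mk w).contains "word" = true

instance (assigned_words : List (List (String × String))) :
    Decidable (Pre_convert_to_llm_format assigned_words) := by
  unfold Pre_convert_to_llm_format; infer_instance

def pvWitness_convert_to_llm_format : (List (List (String × String))) :=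
  [[("speaker", "A"), ("word", "hello")], [("speaker", "B"), ("word", "hi")],
   [("speaker", "A"), ("word", "bye")]]

def Spec_convert_to_llm_format (assigned_words : List (List (String × String))) (out : String) : Prop := out = convert_to_llm_format_alt assigned_words
instance (assigned_words : List (List (String × String))) (out : String) : Decidable (Spec_convert_to_llm_format assigned_words out) := by unfold Spec_convert_to_llm_format; infer_instance

-- ===== CLAIM (what is proved, stated in full; the proofs are below) =====
def Claim_equal_convert_to_llm_format : Prop := ∀ (assigned_words : List (List (String × String))), Dom_convert_to_llm_format assigned_words → Pre_convert_to_llm_format assigned_words → Spec_convert_to_llm_format assigned_words (convert_to_llm_format assigned_words)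

-- ===== LEMMAS AND PROOFS =====

-- tag injectivity ------------------------------------------------------------

lemma digitChar_inj {a b : Nat} (ha : a < 10) (hb : b < 10)
    (h : Nat.digitChar a = Nat.digitChar b) : a = b := by
  interval_cases a <;> interval_cases b <;> revert h <;> decide

lemma toDigits10_inj (a : Nat) : ∀ b, Nat.toDigits 10 a = Nat.toDigits 10 b → a = b := by
  induction a using Nat.strong_induction_on with
  | _ a ih =>
    intro b h
    rw [Nat.toDigits_eq_if (n := a) (by norm_num)] at h
    rw [Nat.toDigits_eq_if (n := b) (by norm_num)] at h
    by_cases h1 : a < 10 <;> by_cases h2 : b < 10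
    · rw [if_pos h1, if_pos h2] at h
      exact digitChar_inj h1 h2 (by simpa using h)
    · rw [if_pos h1, if_neg h2] at h
      have hl := congrArg List.length h
      have hp : 0 < (Nat.toDigits 10 (b / 10)).length := Nat.length_toDigits_pos
      rw [List.length_singleton, List.length_append, List.length_singleton] at hl
      omega
    · rw [if_neg h1, if_pos h2] at h
      have hl := congrArg List.length h
      have hp : 0 < (Nat.toDigits 10 (a / 10)).length := Nat.length_toDigits_pos
      rw [List.length_append, List.length_singleton, List.length_singleton] at hl
      omega
    · rw [if_neg h1, if_neg h2] at h
      obtain ⟨h3, h4⟩ := List.append_inj' h (by simp)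
      have hd : a / 10 = b / 10 := ih (a / 10) (by omega) _ h3
      have hm : a % 10 = b % 10 :=
        digitChar_inj (Nat.mod_lt _ (by norm_num)) (Nat.mod_lt _ (by norm_num))
          (by simpa using h4)
      omega

lemma toStr_inj_nonneg {a b : Int} (ha : 0 ≤ a) (hb : 0 ≤ b)
    (h : PySem.Int.toStr a = PySem.Int.toStr b) : a = b := by
  have h' := congrArg String.toList h
  rw [PySem.Int.toList_toStr, PySem.Int.toList_toStr] at h'
  unfold PySem.Int.toChars at h'
  rw [if_neg (by omega), if_neg (by omega)] at h'
  have := toDigits10_inj _ _ h'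
  omega

lemma tagOf_inj {a b : Int} (ha : 0 ≤ a) (hb : 0 ≤ b) (h : tagOf a = tagOf b) : a = b := by
  unfold tagOf at h
  have h' := congrArg String.toList h
  simp only [String.toList_append, List.append_assoc] at h'
  have h1 := List.append_cancel_left h'
  have h2 := List.append_cancel_right h1
  apply toStr_inj_nonneg ha hb
  have h3 := congrArg String.ofList h2
  simpa using h3

-- dict invariant -------------------------------------------------------------

-- the tag list <Speaker1> … <Speaker(n)>
def valTags (n : Nat) : List String := (List.range n).map (fun k : Nat => tagOf (((k : Nat) : Int) + 1))

lemma valTags_succ (n : Nat) : valTags (n + 1) = valTags n ++ [tagOf ((n : Int) + 1)] := by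
  unfold valTags
  rw [List.range_succ, List.map_append]
  rfl

-- the values of the speaker map are exactly <Speaker1> … <Speaker(size)>, in order
def MapInv (map : PySem.Dict String String) : Prop :=
  map.keys.Nodup ∧ map.items.map Prod.snd = valTags map.size

lemma mapInv_val_bound {map : PySem.Dict String String} (hinv : MapInv map)
    {p t : String} (hp : map.get? p = some t) :
    ∃ k : Nat, k < map.size ∧ t = tagOf ((k : Int) + 1) := by
  have hmem := PySem.Dict.mem_items_of_get?_eq_some _ hp
  have hv : t ∈ map.items.map Prod.snd := List.mem_map_of_mem hmem
  rw [hinv.2] at hv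
  unfold valTags at hv
  obtain ⟨k, hkmem, heq⟩ := List.mem_map.mp hv
  exact ⟨k, List.mem_range.mp hkmem, heq.symm⟩

lemma mapInv_get_ne {map : PySem.Dict String String} (hinv : MapInv map)
    {p q tp tq : String} (hpq : p ≠ q)
    (hp : map.get? p = some tp) (hq : map.get? q = some tq) : tp ≠ tq := by
  intro he
  subst he
  have hip := PySem.Dict.mem_items_of_get?_eq_some _ hp
  have hiq := PySem.Dict.mem_items_of_get?_eq_some _ hq
  have hnd : (map.items.map Prod.snd).Nodup := by
    rw [hinv.2]
    unfold valTags
    refine List.Nodup.map ?_ (List.nodup_range)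
    intro x y hxy
    have := tagOf_inj (by positivity) (by positivity) hxy
    omega
  have := List.inj_on_of_nodup_map hnd hip hiq rfl
  exact hpq (congrArg Prod.fst this)

lemma mapInv_empty : MapInv PySem.Dict.empty := by
  constructor
  · simp [PySem.Dict.keys, PySem.Dict.empty]
  · simp [PySem.Dict.empty, PySem.Dict.size, valTags]

lemma mapInv_insert {map : PySem.Dict String String} (hinv : MapInv map)
    {spk : String} (hc : map.contains spk = false) :
    MapInv (map.insert spk (tagOf ((map.size : Int) + 1))) ∧
      (map.insert spk (tagOf ((map.size : Int) + 1))).size = map.size + 1 := by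
  have hitems := PySem.Dict.items_insert_of_not_contains (d := map)
    (k := spk) (v := tagOf ((map.size : Int) + 1)) hc
  have hsize : (map.insert spk (tagOf ((map.size : Int) + 1))).size = map.size + 1 := by
    rw [PySem.Dict.size_insert, if_neg (by simp [hc])]
  refine ⟨⟨PySem.Dict.nodup_keys_insert _ _ _ hinv.1, ?_⟩, hsize⟩
  rw [hitems, hsize, List.map_append, hinv.2, valTags_succ]
  simp

-- small list facts -----------------------------------------------------------

lemma dropWhile_head?_false {α : Type} (p : α → Bool) :
    ∀ (l : List α) (w : α), (l.dropWhile p).head? = some w → p w = false := by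
  intro l
  induction l with
  | nil => simp
  | cons a l ih =>
    intro w h
    by_cases hp : p a
    · rw [List.dropWhile_cons_of_pos hp] at h
      exact ih w h
    · rw [List.dropWhile_cons_of_neg (by simpa using hp)] at h
      simp at h
      subst h
      simpa using hp

lemma drop_length_takeWhile {α : Type} (p : α → Bool) (l : List α) :
    l.drop (l.takeWhile p).length = l.dropWhile p := by
  induction l with
  | nil => rfl
  | cons a l ih =>
    by_cases hp : p a
    · rw [List.takeWhile_cons_of_pos hp, List.dropWhile_cons_of_pos hp]
      simpa using ih
    · rw [List.takeWhile_cons_of_neg (by simpa using hp),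
        List.dropWhile_cons_of_neg (by simpa using hp)]
      rfl

-- B's loops = span recursion -------------------------------------------------

lemma altInner_eq (xs : List (List (String × String))) (spk : String) :
    ∀ (fuel j : Nat), xs.length ≤ j + fuel →
      altInner xs spk fuel j =
        (((xs.drop j).takeWhile (fun x => dGetD x "speaker" == spk)).map (fun x => dGetD x "word"),
         j + ((xs.drop j).takeWhile (fun x => dGetD x "speaker" == spk)).length) := by
  intro fuel
  induction fuel with
  | zero =>
    intro j hj
    rw [List.drop_eq_nil_iff.mpr (by omega)]
    simp [altInner]
  | succ fuel ih =>
    intro j hj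
    by_cases h : j < xs.length
    · rw [altInner, dif_pos h]
      by_cases hm : (dGetD xs[j] "speaker" == spk) = true
      · rw [List.drop_eq_getElem_cons h,
          List.takeWhile_cons_of_pos (p := fun x => dGetD x "speaker" == spk) (by simpa using hm)]
        rw [if_pos hm, ih (j + 1) (by omega)]
        simp
        omega
      · rw [List.drop_eq_getElem_cons h,
          List.takeWhile_cons_of_neg (p := fun x => dGetD x "speaker" == spk) (by simpa using hm)]
        rw [if_neg hm]
        simp
    · rw [List.drop_eq_nil_iff.mpr (by omega), altInner, dif_neg h]
      simp

-- the run-structured recursion both programs compute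
def spanGo : List (List (String × String)) → PySem.Dict String String → List String
  | [], _ => []
  | w :: ws, tags =>
    let spk := dGetD w "speaker"
    let tags' := if tags.contains spk then tags
                 else tags.insert spk (tagOf ((tags.size : Int) + 1))
    (tags'.getD spk "" ++ ":") ::
      (((w :: ws).takeWhile (fun x => dGetD x "speaker" == spk)).map (fun x => dGetD x "word") ++
        spanGo ((w :: ws).dropWhile (fun x => dGetD x "speaker" == spk)) tags')
termination_by l _ => l.length
decreasing_by
  rw [List.dropWhile_cons_of_pos (p := fun x => dGetD x "speaker" == dGetD w "speaker") (by simp)]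
  have := List.length_dropWhile_le (fun x => dGetD x "speaker" == dGetD w "speaker") ws
  simp only [List.length_cons]
  omega

lemma spanGo_nil (tags : PySem.Dict String String) : spanGo [] tags = [] := by
  rw [spanGo.eq_def]

lemma spanGo_cons (w : List (String × String)) (ws : List (List (String × String)))
    (tags : PySem.Dict String String) :
    spanGo (w :: ws) tags =
      ((if tags.contains (dGetD w "speaker") then tags
        else tags.insert (dGetD w "speaker") (tagOf ((tags.size : Int) + 1))).getD
          (dGetD w "speaker") "" ++ ":") ::
        (((w :: ws).takeWhile (fun x => dGetD x "speaker" == dGetD w "speaker")).map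
            (fun x => dGetD x "word") ++
          spanGo ((w :: ws).dropWhile (fun x => dGetD x "speaker" == dGetD w "speaker"))
            (if tags.contains (dGetD w "speaker") then tags
             else tags.insert (dGetD w "speaker") (tagOf ((tags.size : Int) + 1)))) := by
  rw [spanGo.eq_def]

lemma altOuter_cons (xs : List (List (String × String))) (fuel i : Nat)
    (tags : PySem.Dict String String) (h : i < xs.length) :
    altOuter xs (fuel + 1) i tags =
      ((if tags.contains (dGetD xs[i] "speaker") then tags
        else tags.insert (dGetD xs[i] "speaker") (tagOf ((tags.size : Int) + 1))).getD
          (dGetD xs[i] "speaker") "" ++ ":") ::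
        ((altInner xs (dGetD xs[i] "speaker") (xs.length - i) i).1 ++
          altOuter xs fuel (altInner xs (dGetD xs[i] "speaker") (xs.length - i) i).2
            (if tags.contains (dGetD xs[i] "speaker") then tags
             else tags.insert (dGetD xs[i] "speaker") (tagOf ((tags.size : Int) + 1)))) := by
  rw [altOuter, dif_pos h]

lemma altOuter_eq (xs : List (List (String × String))) :
    ∀ (fuel i : Nat) (tags : PySem.Dict String String), xs.length - i ≤ fuel →
      altOuter xs fuel i tags = spanGo (xs.drop i) tags := by
  intro fuel
  induction fuel with
  | zero =>
    intro i tags hn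
    rw [altOuter, List.drop_eq_nil_iff.mpr (by omega), spanGo_nil]
  | succ fuel ih =>
    intro i tags hn
    by_cases h : i < xs.length
    · have hdrop : xs.drop i = xs[i] :: xs.drop (i + 1) := List.drop_eq_getElem_cons h
      have hlenpos : 0 <
          ((xs.drop i).takeWhile (fun x => dGetD x "speaker" == dGetD xs[i] "speaker")).length := by
        rw [hdrop, List.takeWhile_cons_of_pos
          (p := fun x => dGetD x "speaker" == dGetD xs[i] "speaker") (by simp)]
        simp
      have hrest : xs.drop
            (i + ((xs.drop i).takeWhile (fun x => dGetD x "speaker" == dGetD xs[i] "speaker")).length)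
          = (xs.drop i).dropWhile (fun x => dGetD x "speaker" == dGetD xs[i] "speaker") := by
        rw [← drop_length_takeWhile (fun x => dGetD x "speaker" == dGetD xs[i] "speaker") (xs.drop i),
          List.drop_drop, Nat.add_comm]
      rw [altOuter_cons xs fuel i tags h, altInner_eq xs _ (xs.length - i) i (by omega)]
      rw [ih _ _ (by omega)]
      rw [hrest]
      conv_rhs => rw [hdrop, spanGo_cons]
      rw [← hdrop]
    · rw [altOuter, dif_neg h, List.drop_eq_nil_iff.mpr (by omega), spanGo_nil]

-- A's fold = span recursion --------------------------------------------------

def CurOK (cur : Option String) (map : PySem.Dict String String)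
    (l : List (List (String × String))) : Prop :=
  cur = none ∨ ∃ q t, map.get? q = some t ∧ cur = some t ∧
    ∀ w, l.head? = some w → dGetD w "speaker" ≠ q

lemma aRun (spk t : String) :
    ∀ (r : List (List (String × String))) (res : List String)
      (map : PySem.Dict String String) (ctr : Int),
      (∀ w ∈ r, dGetD w "speaker" = spk) → map.contains spk = true → map.getD spk "" = t →
      r.foldl aStep (res, some t, map, ctr) =
        (res ++ r.map (fun w => dGetD w "word"), some t, map, ctr) := by
  intro r
  induction r with
  | nil => simp
  | cons w ws ih =>
    intro res map ctr hall hc ht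
    have hw : dGetD w "speaker" = spk := hall w (by simp)
    have hstep : aStep (res, some t, map, ctr) w = (res ++ [dGetD w "word"], some t, map, ctr) := by
      unfold aStep
      simp [hw, hc, ht]
    rw [List.foldl_cons, hstep, ih _ _ _ (fun x hx => hall x (by simp [hx])) hc ht]
    simp

lemma A_main :
    ∀ (n : Nat) (l : List (List (String × String))), l.length ≤ n →
      ∀ (map : PySem.Dict String String) (cur : Option String) (res : List String),
        MapInv map → CurOK cur map l →
        (l.foldl aStep (res, cur, map, (map.size : Int) + 1)).1 = res ++ spanGo l map := by
  intro n
  induction n with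
  | zero =>
    intro l hl map cur res hinv hcur
    have hnil : l = [] := List.length_eq_zero_iff.mp (by omega)
    subst hnil
    simp [spanGo_nil]
  | succ n ih =>
    intro l hl map cur res hinv hcur
    cases l with
    | nil => simp [spanGo_nil]
    | cons w ws =>
      have hsplit : ws = ws.takeWhile (fun x => dGetD x "speaker" == dGetD w "speaker") ++
          ws.dropWhile (fun x => dGetD x "speaker" == dGetD w "speaker") :=
        (List.takeWhile_append_dropWhile).symm
      have hall : ∀ x ∈ ws.takeWhile (fun x => dGetD x "speaker" == dGetD w "speaker"),
          dGetD x "speaker" = dGetD w "speaker" := by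
        intro x hx
        simpa using List.mem_takeWhile_imp hx
      have hlen : (ws.dropWhile (fun x => dGetD x "speaker" == dGetD w "speaker")).length ≤ n := by
        have := List.length_dropWhile_le (fun x => dGetD x "speaker" == dGetD w "speaker") ws
        simp only [List.length_cons] at hl
        omega
      have hhd' : ∀ w', (ws.dropWhile (fun x => dGetD x "speaker" == dGetD w "speaker")).head? =
          some w' → dGetD w' "speaker" ≠ dGetD w "speaker" := by
        intro w' hw'
        have := dropWhile_head?_false _ _ _ hw'
        simpa using this
      by_cases hc : map.contains (dGetD w "speaker") = true
      · obtain ⟨t, hget⟩ : ∃ t, map.get? (dGetD w "speaker") = some t := by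
          rw [PySem.Dict.contains_eq_isSome_get?] at hc
          exact Option.isSome_iff_exists.mp hc
        have hgetD : map.getD (dGetD w "speaker") "" = t :=
          PySem.Dict.getD_of_get?_eq_some map "" hget
        have hne : cur ≠ some t := by
          rcases hcur with hnone | ⟨q, tq, hq, hcq, hhd⟩
          · rw [hnone]; simp
          · rw [hcq]
            intro he
            injection he with he'
            have hqs : dGetD w "speaker" ≠ q := hhd w rfl
            exact mapInv_get_ne hinv hqs hget hq he'.symm
        have hstep : aStep (res, cur, map, (map.size : Int) + 1) w
            = (res ++ [t ++ ":", dGetD w "word"], some t, map, (map.size : Int) + 1) := by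
          unfold aStep
          simp only [hc, if_true, hgetD]
          rw [if_pos hne]
          simp
        rw [List.foldl_cons, hstep]
        conv_lhs => rw [hsplit]
        rw [List.foldl_append]
        rw [aRun (dGetD w "speaker") t _ _ _ _ hall hc hgetD]
        have hcur' : CurOK (some t) map
            (ws.dropWhile (fun x => dGetD x "speaker" == dGetD w "speaker")) :=
          Or.inr ⟨dGetD w "speaker", t, hget, rfl, fun w' hw' he => hhd' w' hw' he⟩
        rw [ih _ hlen map (some t) _ hinv hcur']
        rw [spanGo_cons, if_pos hc, hgetD]
        rw [List.takeWhile_cons_of_pos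
          (p := fun x => dGetD x "speaker" == dGetD w "speaker") (by simp)]
        rw [List.dropWhile_cons_of_pos
          (p := fun x => dGetD x "speaker" == dGetD w "speaker") (by simp)]
        simp
      · have hcf : map.contains (dGetD w "speaker") = false := by simpa using hc
        obtain ⟨hinv', hsize'⟩ := mapInv_insert hinv hcf
        have hget' : (map.insert (dGetD w "speaker") (tagOf ((map.size : Int) + 1))).get?
            (dGetD w "speaker") = some (tagOf ((map.size : Int) + 1)) :=
          PySem.Dict.get?_insert_self _ _ _
        have hgetD' : (map.insert (dGetD w "speaker") (tagOf ((map.size : Int) + 1))).getD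
            (dGetD w "speaker") "" = tagOf ((map.size : Int) + 1) :=
          PySem.Dict.getD_of_get?_eq_some _ "" hget'
        have hne : cur ≠ some (tagOf ((map.size : Int) + 1)) := by
          rcases hcur with hnone | ⟨q, tq, hq, hcq, hhd⟩
          · rw [hnone]; simp
          · rw [hcq]
            intro he
            injection he with he'
            obtain ⟨k, hk, hkt⟩ := mapInv_val_bound hinv hq
            rw [hkt] at he'
            have := tagOf_inj (by positivity) (by positivity) he'
            omega
        have hstep : aStep (res, cur, map, (map.size : Int) + 1) w
            = (res ++ [tagOf ((map.size : Int) + 1) ++ ":", dGetD w "word"],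
               some (tagOf ((map.size : Int) + 1)),
               map.insert (dGetD w "speaker") (tagOf ((map.size : Int) + 1)),
               ((map.size : Int) + 1) + 1) := by
          unfold aStep
          simp only [hcf, Bool.false_eq_true, if_false, hgetD']
          rw [if_pos hne]
          simp
        rw [List.foldl_cons, hstep]
        have hctr : ((map.size : Int) + 1) + 1 =
            ((map.insert (dGetD w "speaker") (tagOf ((map.size : Int) + 1))).size : Int) + 1 := by
          rw [hsize']
          push_cast
          ring
        rw [hctr]
        conv_lhs => rw [hsplit]
        rw [List.foldl_append]
        have hcont' : (map.insert (dGetD w "speaker") (tagOf ((map.size : Int) + 1))).contains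
            (dGetD w "speaker") = true := PySem.Dict.contains_insert_self _ _ _
        rw [aRun (dGetD w "speaker") (tagOf ((map.size : Int) + 1)) _ _ _ _ hall hcont' hgetD']
        have hcur' : CurOK (some (tagOf ((map.size : Int) + 1)))
            (map.insert (dGetD w "speaker") (tagOf ((map.size : Int) + 1)))
            (ws.dropWhile (fun x => dGetD x "speaker" == dGetD w "speaker")) :=
          Or.inr ⟨dGetD w "speaker", tagOf ((map.size : Int) + 1), hget', rfl,
            fun w' hw' he => hhd' w' hw' he⟩
        rw [ih _ hlen _ _ _ hinv' hcur']
        rw [spanGo_cons, if_neg (by simp [hcf]), hgetD']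
        rw [List.takeWhile_cons_of_pos
          (p := fun x => dGetD x "speaker" == dGetD w "speaker") (by simp)]
        rw [List.dropWhile_cons_of_pos
          (p := fun x => dGetD x "speaker" == dGetD w "speaker") (by simp)]
        simp

-- ===== VERDICT (by name: the statement is the Claim_ definition above) =====
theorem convert_to_llm_format_spec : Claim_equal_convert_to_llm_format := by
  intro xs _hdom _hpre
  unfold Spec_convert_to_llm_format convert_to_llm_format convert_to_llm_format_alt
  have hA := A_main xs.length xs le_rfl PySem.Dict.empty none [] mapInv_empty (Or.inl rfl)
  have hsz : ((PySem.Dict.empty : PySem.Dict String String).size : Int) + 1 = 1 := by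
    simp [PySem.Dict.size, PySem.Dict.empty]
  rw [hsz] at hA
  rw [hA, altOuter_eq xs xs.length 0 PySem.Dict.empty (by omega)]
  simp
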